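-- pv_equiv track=rewrite | github.com/willkeepgoing/SPos | sitting_pose_recognition/division.py | dfs_left
-- ===== SOURCE A (Python) =====
-- def dfs_left(b, visited, i, j, contour):
--     m, n = len(b), len(b[0])
--     if visited[i][j] or b[i][j] == 0:
--         return False, contour
--     contour.append((i, j))
--     visited[i][j] = 1
--
--     if len(contour) > 0 and (i == 0 or j == 0 or i == m-1 or j == n-1):
--         return True, contour
--
--     # The depth first search order is: right, bottom, left, top
--     flag, contour = dfs_left(b, visited, i, j + 1, contour)  # 右
--     if flag:
--         return flag, contour
--     flag, contour = dfs_left(b, visited, i + 1, j, contour)  # 下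
--     if flag:
--         return flag, contour
--     flag, contour = dfs_left(b, visited, i, j - 1, contour)  # 左
--     if flag:
--         return flag, contour
--     flag, contour = dfs_left(b, visited, i - 1, j, contour)  # 上
--     return flag, contour
-- ===== SOURCE B (Python) =====
-- def dfs_left(b, visited, i, j, contour):
--     m, n = len(b), len(b[0])
--     stack = [(i, j)]
--     while stack:
--         x, y = stack.pop()
--         if visited[x][y] or b[x][y] == 0:
--             continue
--         contour.append((x, y))
--         visited[x][y] = 1
--         if x == 0 or y == 0 or x == m - 1 or y == n - 1:
--             return True, contour
--         # push in reverse preference order so (x, y+1) is popped first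
--         stack.extend([(x - 1, y), (x, y - 1), (x + 1, y), (x, y + 1)])
--     return False, contour
-- ===== Notes on version B (the rewrite author's own statement) =====
-- stated objective: alternative
-- what changed: The recursive four-way DFS is replaced by an iterative DFS with an explicit stack (cells pushed in reverse preference order, visited/zero check and border test done at pop time), which removes Python's recursion-depth limit while producing the same preorder contour.
-- outside the precondition, e.g. on dfs_left([[1]], [[0]], -1, 0, []): A returns (True, [(-1, 0)]), B returns (True, [(-1, 0)])
import Mathlib
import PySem

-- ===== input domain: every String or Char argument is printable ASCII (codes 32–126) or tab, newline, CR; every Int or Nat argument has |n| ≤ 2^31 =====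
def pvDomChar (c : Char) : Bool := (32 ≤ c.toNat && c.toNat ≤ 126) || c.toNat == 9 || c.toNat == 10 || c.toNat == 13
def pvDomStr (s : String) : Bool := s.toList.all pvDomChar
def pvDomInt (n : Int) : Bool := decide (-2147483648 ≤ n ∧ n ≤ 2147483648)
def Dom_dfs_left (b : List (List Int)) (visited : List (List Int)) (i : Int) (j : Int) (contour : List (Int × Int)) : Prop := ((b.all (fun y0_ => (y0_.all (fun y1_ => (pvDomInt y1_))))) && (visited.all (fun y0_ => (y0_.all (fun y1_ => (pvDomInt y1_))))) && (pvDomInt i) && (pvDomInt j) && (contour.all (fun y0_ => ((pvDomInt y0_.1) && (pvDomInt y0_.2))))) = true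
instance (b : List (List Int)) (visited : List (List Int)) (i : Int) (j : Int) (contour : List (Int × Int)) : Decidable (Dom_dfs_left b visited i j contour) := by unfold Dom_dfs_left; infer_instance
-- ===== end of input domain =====

-- B replaces A's recursive four-way DFS by an iterative DFS with an explicit stack (same visit
-- order, no recursion depth); equivalence is about the RETURN value — both Pythons mutate
-- `visited` and `contour` in place in the same way.

-- shared primitive helpers: `x[i][j]` read and write with Python index semantics
def pvGet2 (v : List (List Int)) (i j : Int) : Option Int :=
  (PySem.List.pyGet? v i).bind fun row => PySem.List.pyGet? row j

def pvSet2 (v : List (List Int)) (i j x : Int) : List (List Int) :=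
  PySem.List.pySetD v i (PySem.List.pySetD ((PySem.List.pyGet? v i).getD []) j x)

-- number of zero entries of `visited` (fuel measure for both ports; fuel is only a totality guard)
def pvCnt (r : List Int) : Nat := r.countP (fun x => x == 0)

def pvZc : List (List Int) → Nat
  | [] => 0
  | r :: v => pvCnt r + pvZc v

-- ===== PORT A =====
-- literal port of A's recursion, with fuel as totality guard; the `| _, _` arm is the
-- IndexError case (excluded by Pre_); `b.headD []` is `b[0]`, exact for b ≠ [] (Pre_)
def dfsA (b : List (List Int)) : Nat → List (List Int) → Int → Int → List (Int × Int) → Bool × List (Int × Int) × List (List Int)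
  | 0, v, _, _, c => (false, c, v)
  | f + 1, v, i, j, c =>
    match pvGet2 v i j, pvGet2 b i j with
    | some vv, some bv =>
      if vv ≠ 0 ∨ bv = 0 then (false, c, v)
      else
        let c1 := c ++ [(i, j)]
        let v1 := pvSet2 v i j 1
        if 0 < c1.length ∧ (i = 0 ∨ j = 0 ∨ i = (b.length : Int) - 1 ∨ j = ((b.headD []).length : Int) - 1) then
          (true, c1, v1)
        else
          match dfsA b f v1 i (j + 1) c1 with      -- 右
          | (true, c2, v2) => (true, c2, v2)
          | (false, c2, v2) =>
          match dfsA b f v2 (i + 1) j c2 with      -- 下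
          | (true, c3, v3) => (true, c3, v3)
          | (false, c3, v3) =>
          match dfsA b f v3 i (j - 1) c3 with      -- 左
          | (true, c4, v4) => (true, c4, v4)
          | (false, c4, v4) => dfsA b f v4 (i - 1) j c4   -- 上
    | _, _ => (false, c, v)

def dfs_left (b : List (List Int)) (visited : List (List Int)) (i : Int) (j : Int) (contour : List (Int × Int)) : Bool × (List (Int × Int)) :=
  let r := dfsA b (pvZc visited + 1) visited i j contour
  (r.1, r.2.1)

-- ===== PORT B =====
-- literal port of B's stack loop (Source B); the stack's top is the list head, so `extend`ing
-- [(x-1,y),(x,y-1),(x+1,y),(x,y+1)] then popping the last is consing (x,y+1) first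
def runB (b : List (List Int)) : Nat → List (List Int) → List (Int × Int) → List (Int × Int) → Bool × List (Int × Int) × List (List Int)
  | 0, v, _, c => (false, c, v)
  | _ + 1, v, [], c => (false, c, v)
  | f + 1, v, (x, y) :: st, c =>
    match pvGet2 v x y, pvGet2 b x y with
    | some vv, some bv =>
      if vv ≠ 0 ∨ bv = 0 then runB b f v st c
      else
        let c1 := c ++ [(x, y)]
        let v1 := pvSet2 v x y 1
        if x = 0 ∨ y = 0 ∨ x = (b.length : Int) - 1 ∨ y = ((b.headD []).length : Int) - 1 then
          (true, c1, v1)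
        else runB b f v1 ((x, y + 1) :: (x + 1, y) :: (x, y - 1) :: (x - 1, y) :: st) c1
    | _, _ => runB b f v st c

def dfs_left_alt (b : List (List Int)) (visited : List (List Int)) (i : Int) (j : Int) (contour : List (Int × Int)) : Bool × (List (Int × Int)) :=
  let r := runB b (4 * pvZc visited + 2) visited [(i, j)] contour
  (r.1, r.2.1)

-- ===== PRECONDITION & SPEC =====
-- Pre_ admits the rectangular grids with an in-grid start (where A recurses and never raises)
-- and the inputs A rejects on its first check without recursing (start cell visited or zero);
-- it excludes the inputs on which Python A raises IndexError (empty/ragged grid, mismatched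
-- `visited` shape, start index outside the grid) together with the starts from which the DFS
-- itself only returns via Python's accidental negative-index wraparound.
def Pre_dfs_left (b : List (List Int)) (visited : List (List Int)) (i : Int) (j : Int) (contour : List (Int × Int)) : Prop :=
  b ≠ [] ∧
  (((∀ row ∈ b, row.length = (b.headD []).length) ∧
    visited.length = b.length ∧
    (∀ row ∈ visited, row.length = (b.headD []).length) ∧
    0 ≤ i ∧ i < (b.length : Int) ∧ 0 ≤ j ∧ j < ((b.headD []).length : Int)) ∨
   (pvGet2 visited i j ≠ none ∧ pvGet2 visited i j ≠ some 0) ∨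
   (pvGet2 visited i j = some 0 ∧ pvGet2 b i j = some 0))

instance (b : List (List Int)) (visited : List (List Int)) (i : Int) (j : Int) (contour : List (Int × Int)) : Decidable (Pre_dfs_left b visited i j contour) := by unfold Pre_dfs_left; infer_instance

def pvWitness_dfs_left : List (List Int) × List (List Int) × Int × Int × (List (Int × Int)) :=
  ([[0, 0, 0], [0, 1, 0], [0, 0, 0]], [[0, 0, 0], [0, 0, 0], [0, 0, 0]], 1, 1, [])

def Spec_dfs_left (b : List (List Int)) (visited : List (List Int)) (i : Int) (j : Int) (contour : List (Int × Int)) (out : Bool × (List (Int × Int))) : Prop := out = dfs_left_alt b visited i j contour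
instance (b : List (List Int)) (visited : List (List Int)) (i : Int) (j : Int) (contour : List (Int × Int)) (out : Bool × (List (Int × Int))) : Decidable (Spec_dfs_left b visited i j contour out) := by unfold Spec_dfs_left; infer_instance

-- ===== CLAIM (what is proved, stated in full; the proofs are below) =====
def Claim_equal_dfs_left : Prop := ∀ (b : List (List Int)) (visited : List (List Int)) (i : Int) (j : Int) (contour : List (Int × Int)), Dom_dfs_left b visited i j contour → Pre_dfs_left b visited i j contour → Spec_dfs_left b visited i j contour (dfs_left b visited i j contour)

-- ===== LEMMAS AND PROOFS =====

theorem pvCnt_set_lt (row : List Int) (t : Nat) (h : row[t]? = some 0) :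
    pvCnt (row.set t 1) < pvCnt row := by
  induction row generalizing t with
  | nil => simp at h
  | cons a r ih =>
    cases t with
    | zero =>
      simp at h
      subst h
      simp [pvCnt, List.countP_cons]
    | succ t =>
      simp at h
      have := ih t h
      simp [pvCnt, List.countP_cons] at *
      omega

theorem pvZc_set_lt (v : List (List Int)) (k : Nat) (row r' : List Int)
    (hk : v[k]? = some row) (h : pvCnt r' < pvCnt row) :
    pvZc (v.set k r') < pvZc v := by
  induction v generalizing k with
  | nil => simp at hk
  | cons r0 vs ih =>
    cases k with
    | zero =>
      simp at hk
      subst hk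
      simp [pvZc]
      omega
    | succ k =>
      simp at hk
      have := ih k hk
      simp [pvZc]
      omega

theorem pvZc_pvSet2_lt (v : List (List Int)) (i j : Int) (h : pvGet2 v i j = some 0) :
    pvZc (pvSet2 v i j 1) < pvZc v := by
  unfold pvGet2 at h
  rcases hrow : PySem.List.pyGet? v i with _ | row
  · rw [hrow] at h; simp at h
  rw [hrow] at h
  simp at h
  -- decompose the outer lookup
  unfold PySem.List.pyGet? at hrow h
  rcases hki : PySem.List.pyIdx? v.length i with _ | k
  · rw [hki] at hrow; simp at hrow
  rw [hki] at hrow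
  simp at hrow
  rcases hkj : PySem.List.pyIdx? row.length j with _ | t
  · rw [hkj] at h; simp at h
  rw [hkj] at h
  simp at h
  have hset : pvSet2 v i j 1 = v.set k (row.set t 1) := by
    unfold pvSet2 PySem.List.pySetD PySem.List.pySet? PySem.List.pyGet?
    rw [hki]
    simp [hrow, hkj]
  rw [hset]
  exact pvZc_set_lt v k row (row.set t 1) hrow (pvCnt_set_lt row t h)

theorem dfsA_zc (b : List (List Int)) (f : Nat) :
    ∀ (v : List (List Int)) (i j : Int) (c : List (Int × Int)),
      pvZc (dfsA b f v i j c).2.2 ≤ pvZc v := by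
  induction f with
  | zero => intro v i j c; simp [dfsA]
  | succ f ih =>
    intro v i j c
    rw [dfsA]
    rcases hv : pvGet2 v i j with _ | vv <;> rcases hb : pvGet2 b i j with _ | bv <;> simp
    by_cases hskip : vv ≠ 0 ∨ bv = 0
    · simp [hskip]
    · simp [hskip]
      push_neg at hskip
      have hv0 : pvGet2 v i j = some 0 := by rw [hv, hskip.1]
      have hlt := pvZc_pvSet2_lt v i j hv0
      by_cases hbd : (i = 0 ∨ j = 0 ∨ i = (b.length : Int) - 1 ∨ j = ((b.head?.getD []).length : Int) - 1)
      · simp [hbd]; omega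
      · simp [hbd]
        rcases h1 : dfsA b f (pvSet2 v i j 1) i (j + 1) (c ++ [(i, j)]) with ⟨fl1, c2, v2⟩
        have e1 := ih (pvSet2 v i j 1) i (j + 1) (c ++ [(i, j)])
        rw [h1] at e1; simp at e1
        cases fl1
        · simp
          rcases h2 : dfsA b f v2 (i + 1) j c2 with ⟨fl2, c3, v3⟩
          have e2 := ih v2 (i + 1) j c2
          rw [h2] at e2; simp at e2
          cases fl2
          · simp
            rcases h3 : dfsA b f v3 i (j - 1) c3 with ⟨fl3, c4, v4⟩
            have e3 := ih v3 i (j - 1) c3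
            rw [h3] at e3; simp at e3
            cases fl3
            · simp
              have e4 := ih v4 (i - 1) j c4
              omega
            · simp; omega
          · simp; omega
        · simp; omega

theorem runB_fuel (b : List (List Int)) (f : Nat) :
    ∀ (g : Nat) (v : List (List Int)) (st : List (Int × Int)) (c : List (Int × Int)),
      4 * pvZc v + st.length < f → 4 * pvZc v + st.length < g →
      runB b f v st c = runB b g v st c := by
  induction f with
  | zero => intro g v st c hf; omega
  | succ f ih =>
    intro g v st c hf hg
    rcases g with _ | g
    · omega
    rcases st with _ | ⟨⟨x, y⟩, st⟩
    · rw [runB, runB]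
    rw [runB, runB]
    simp only [List.length_cons] at hf hg
    rcases hv : pvGet2 v x y with _ | vv <;> rcases hb : pvGet2 b x y with _ | bv <;>
      simp <;> try exact ih g v st c (by omega) (by omega)
    by_cases hskip : vv ≠ 0 ∨ bv = 0
    · simp [hskip]; exact ih g v st c (by omega) (by omega)
    · simp [hskip]
      push_neg at hskip
      have hv0 : pvGet2 v x y = some 0 := by rw [hv, hskip.1]
      have hlt := pvZc_pvSet2_lt v x y hv0
      by_cases hbd : x = 0 ∨ y = 0 ∨ x = (b.length : Int) - 1 ∨ y = ((b.head?.getD []).length : Int) - 1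
      · simp [hbd]
      · simp [hbd]
        exact ih g (pvSet2 v x y 1) ((x, y + 1) :: (x + 1, y) :: (x, y - 1) :: (x - 1, y) :: st)
          (c ++ [(x, y)]) (by simp; omega) (by simp; omega)

theorem runB_nil (b : List (List Int)) (f : Nat) (hf : 1 ≤ f) (v : List (List Int)) (c : List (Int × Int)) :
    runB b f v [] c = (false, c, v) := by
  rcases f with _ | f
  · omega
  · rw [runB]

-- the bridge: popping (i,j) from the stack behaves like A's recursive call on (i,j)
-- followed by processing the rest of the stack
theorem bridge (b : List (List Int)) (f : Nat) :
    ∀ (v : List (List Int)) (i j : Int) (st c : List (Int × Int)) (g h : Nat),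
      pvZc v < f → 4 * pvZc v + st.length + 1 < g → 4 * pvZc v + st.length < h →
      runB b g v ((i, j) :: st) c =
        (match dfsA b f v i j c with
         | (true, c', v') => (true, c', v')
         | (false, c', v') => runB b h v' st c') := by
  induction f with
  | zero => intro v i j st c g h hf; omega
  | succ f ih =>
    intro v i j st c g h hf hg hh
    rcases g with _ | g
    · omega
    rw [runB, dfsA]
    rcases hv : pvGet2 v i j with _ | vv <;> rcases hb : pvGet2 b i j with _ | bv <;>
      simp <;> try exact runB_fuel b g h v st c (by omega) (by omega)
    by_cases hskip : vv ≠ 0 ∨ bv = 0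
    · simp [hskip]; exact runB_fuel b g h v st c (by omega) (by omega)
    · simp [hskip]
      push_neg at hskip
      have hv0 : pvGet2 v i j = some 0 := by rw [hv, hskip.1]
      have hlt := pvZc_pvSet2_lt v i j hv0
      by_cases hbd : i = 0 ∨ j = 0 ∨ i = (b.length : Int) - 1 ∨ j = ((b.head?.getD []).length : Int) - 1
      · simp [hbd]
      · simp [hbd]
        -- first child (i, j+1)
        rw [ih (pvSet2 v i j 1) i (j + 1) ((i + 1, j) :: (i, j - 1) :: (i - 1, j) :: st)
            (c ++ [(i, j)]) g g (by omega) (by simp; omega) (by simp; omega)]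
        rcases h1 : dfsA b f (pvSet2 v i j 1) i (j + 1) (c ++ [(i, j)]) with ⟨fl1, c2, v2⟩
        have e1 := dfsA_zc b f (pvSet2 v i j 1) i (j + 1) (c ++ [(i, j)])
        rw [h1] at e1; simp at e1
        cases fl1
        · simp
          -- second child (i+1, j)
          rw [ih v2 (i + 1) j ((i, j - 1) :: (i - 1, j) :: st) c2 g g
              (by omega) (by simp; omega) (by simp; omega)]
          rcases h2 : dfsA b f v2 (i + 1) j c2 with ⟨fl2, c3, v3⟩
          have e2 := dfsA_zc b f v2 (i + 1) j c2
          rw [h2] at e2; simp at e2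
          cases fl2
          · simp
            -- third child (i, j-1)
            rw [ih v3 i (j - 1) ((i - 1, j) :: st) c3 g g
                (by omega) (by simp; omega) (by simp; omega)]
            rcases h3 : dfsA b f v3 i (j - 1) c3 with ⟨fl3, c4, v4⟩
            have e3 := dfsA_zc b f v3 i (j - 1) c3
            rw [h3] at e3; simp at e3
            cases fl3
            · simp
              -- fourth child (i-1, j)
              rw [ih v4 (i - 1) j st c4 g g (by omega) (by omega) (by omega)]
              rcases h4 : dfsA b f v4 (i - 1) j c4 with ⟨fl4, c5, v5⟩
              have e4 := dfsA_zc b f v4 (i - 1) j c4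
              rw [h4] at e4; simp at e4
              cases fl4
              · simp
                exact runB_fuel b g h v5 st c5 (by omega) (by omega)
              · simp
            · simp
          · simp
        · simp

-- ===== VERDICT (by name: the statement is the Claim_ definition above) =====
theorem dfs_left_spec : Claim_equal_dfs_left := by
  intro b visited i j contour _ _
  unfold Spec_dfs_left dfs_left dfs_left_alt
  have hbr := bridge b (pvZc visited + 1) visited i j [] contour
      (4 * pvZc visited + 2) (4 * pvZc visited + 1) (by omega) (by simp) (by simp)
  rw [hbr]
  rcases hr : dfsA b (pvZc visited + 1) visited i j contour with ⟨fl, c', v'⟩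
  cases fl
  · simp [runB_nil b (4 * pvZc visited + 1) (by omega)]
  · simp
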